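-- pv_equiv track=rewrite | github.com/YacineCC/UNI | L2/GOVACATION/I43/TP3/tp3.py | trigrammes
-- ===== SOURCE A (Python) =====
-- def trigrammes(texte):
--
-- 	i = 0
-- 	L = []
--
-- 	while(i < len(texte) -2):
-- 		ch = ""
-- 		for k in range(3):
-- 			ch += texte[i+k]
--
-- 		L += [ch]
-- 		i += 1
-- 	return L
-- ===== SOURCE B (Python) =====
-- def trigrammes(texte):
--     out = []
--     s = texte
--     while len(s) >= 3:
--         out.append(s[:3])
--         s = s[1:]
--     return out
-- ===== Notes on version B (the rewrite author's own statement) =====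
-- stated objective: alternative
-- what changed: Replaces A's index cursor with an inner character-concatenation loop by suffix peeling: the loop state is the remaining string itself, each step appends its 3-character prefix slice and drops its first character.
import Mathlib
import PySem

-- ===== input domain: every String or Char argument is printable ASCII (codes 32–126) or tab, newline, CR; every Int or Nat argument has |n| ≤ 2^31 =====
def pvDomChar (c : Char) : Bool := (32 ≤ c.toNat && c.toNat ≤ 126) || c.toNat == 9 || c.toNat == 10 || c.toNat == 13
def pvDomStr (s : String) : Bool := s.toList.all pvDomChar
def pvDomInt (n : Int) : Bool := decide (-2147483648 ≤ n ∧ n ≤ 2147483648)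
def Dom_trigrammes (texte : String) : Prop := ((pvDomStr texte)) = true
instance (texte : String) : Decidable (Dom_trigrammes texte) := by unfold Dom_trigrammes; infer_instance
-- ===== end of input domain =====

-- B computes the trigrams by suffix peeling: the loop state is the remaining string, each step
-- appends its 3-character prefix slice and drops its head — no index cursor, no inner char loop; no speed claim.

-- ===== PORT A =====
-- while(i < len(texte)-2): ch = ""; for k in range(3): ch += texte[i+k]; L += [ch]; i += 1
def trigrammesLoopA (s : List Char) (i : Nat) (L : List String) : List String :=
  if i < s.length - 2 then
    let ch := (PySem.List.pyRange 0 3 1).foldl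
      (fun ch k => ch ++ (PySem.List.pyGet? s ((i : Int) + k)).toList) ([] : List Char)
    trigrammesLoopA s (i + 1) (L ++ [String.ofList ch])
  else L
termination_by s.length - i

def trigrammes (texte : String) : List String :=
  trigrammesLoopA texte.toList 0 []

-- ===== PORT B =====
-- out = []; s = texte; while len(s) >= 3: out.append(s[:3]); s = s[1:]
def trigrammesAltLoop (out : List String) (s : List Char) : List String :=
  if 3 ≤ s.length then
    trigrammesAltLoop (out ++ [String.ofList (PySem.List.slice s none (some 3))])
      (PySem.List.slice s (some 1) none)
  else out
termination_by s.length
decreasing_by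
  rw [PySem.List.slice_from (ha := by norm_num)]
  simp only [Int.toNat_one, List.length_drop]
  omega

def trigrammes_alt (texte : String) : List String :=
  trigrammesAltLoop [] texte.toList

-- ===== PRECONDITION & SPEC =====
def Spec_trigrammes (texte : String) (out : List String) : Prop := out = trigrammes_alt texte
instance (texte : String) (out : List String) : Decidable (Spec_trigrammes texte out) := by unfold Spec_trigrammes; infer_instance

-- ===== CLAIM (what is proved, stated in full; the proofs are below) =====
def Claim_equal_trigrammes : Prop := ∀ (texte : String), Dom_trigrammes texte → Spec_trigrammes texte (trigrammes texte)

-- ===== LEMMAS AND PROOFS =====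

-- proof-side helper: the trigram list of a suffix, by structural recursion
def triList (cs : List Char) : List String :=
  match cs with
  | a :: b :: c :: rest => String.ofList [a, b, c] :: triList (b :: c :: rest)
  | _ => []

theorem triList_short (t : List Char) (h : t.length ≤ 2) : triList t = [] := by
  match t, h with
  | [], _ => rfl
  | [_], _ => rfl
  | [_, _], _ => rfl

theorem loopB_eq (out : List String) (s : List Char) :
    trigrammesAltLoop out s = out ++ triList s := by
  rw [trigrammesAltLoop]
  split_ifs with h
  · match s, h with
    | a :: b :: c :: rest, _ =>
      rw [PySem.List.slice_to (hb := by norm_num), PySem.List.slice_from (ha := by norm_num),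
        loopB_eq]
      simp [triList]
  · rw [triList_short _ (by omega)]
    simp
termination_by s.length

theorem loopA_eq (s : List Char) (i : Nat) (L : List String) :
    trigrammesLoopA s i L = L ++ triList (s.drop i) := by
  by_cases h : i < s.length - 2
  · have h0 : i < s.length := by omega
    have h1 : i + 1 < s.length := by omega
    have h2 : i + 2 < s.length := by omega
    have hch : (PySem.List.pyRange 0 3 1).foldl
        (fun ch k => ch ++ (PySem.List.pyGet? s ((i : Int) + k)).toList) ([] : List Char)
        = [s[i], s[i+1], s[i+2]] := by
      have hr : PySem.List.pyRange 0 3 1 = [0, 1, 2] := by decide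
      rw [hr]
      simp only [List.foldl, List.nil_append]
      have e0 : (i : Int) + 0 = ((i : Nat) : Int) := by ring
      have e1 : (i : Int) + 1 = ((i + 1 : Nat) : Int) := by push_cast; ring
      have e2 : (i : Int) + 2 = ((i + 2 : Nat) : Int) := by push_cast; ring
      rw [e0, e1, e2, PySem.List.pyGet?_natCast, PySem.List.pyGet?_natCast,
        PySem.List.pyGet?_natCast, List.getElem?_eq_getElem h0, List.getElem?_eq_getElem h1,
        List.getElem?_eq_getElem h2]
      rfl
    rw [trigrammesLoopA, if_pos h]
    simp only [hch]
    rw [loopA_eq s (i + 1) (L ++ [String.ofList [s[i], s[i+1], s[i+2]]])]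
    have hdrop : s.drop i = s[i] :: s[i+1] :: s[i+2] :: s.drop (i+3) := by
      rw [List.drop_eq_getElem_cons h0, List.drop_eq_getElem_cons h1,
        List.drop_eq_getElem_cons h2]
    have hdrop1 : s.drop (i + 1) = s[i+1] :: s[i+2] :: s.drop (i+3) := by
      rw [List.drop_eq_getElem_cons h1, List.drop_eq_getElem_cons h2]
    rw [hdrop, hdrop1]
    simp [triList]
  · rw [trigrammesLoopA, if_neg h]
    have : (s.drop i).length ≤ 2 := by simp; omega
    rw [triList_short _ this]
    simp
termination_by s.length - i

-- ===== VERDICT (by name: the statement is the Claim_ definition above) =====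
theorem trigrammes_spec : Claim_equal_trigrammes := by
  intro texte _
  unfold Spec_trigrammes
  rw [trigrammes, trigrammes_alt, loopA_eq, loopB_eq]
  simp
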